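-- pv_equiv track=rewrite | github.com/UWPCE-PythonCert-ClassRepos/SP_Online_PY210 | students/jinee_han/lesson04/dict_lab.py | divisible_by_
-- ===== SOURCE A (Python) =====
-- def divisible_by_(maxcount):
--     two_list = []        # Create s2
--     three_list = []          # Create s3
--     four_list = []            # Create s4
--     for int in range(maxcount):
--         if int % 2 == 0:
--              two_list.append(int)
--         if int % 3 == 0:
--               three_list.append(int)
--         if int % 4 == 0:
--               four_list.append(int)
--     return two_list, three_list,four_list
-- ===== SOURCE B (Python) =====
-- def divisible_by_(maxcount):
--     return (list(range(0, maxcount, 2)),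
--             list(range(0, maxcount, 3)),
--             list(range(0, maxcount, 4)))
-- ===== Notes on version B (the rewrite author's own statement) =====
-- stated objective: idiomatic
-- what changed: Replaces the single loop over range(maxcount) with three modulo tests by three direct stepped range enumerations range(0, maxcount, k) for k = 2, 3, 4.
import Mathlib
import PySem

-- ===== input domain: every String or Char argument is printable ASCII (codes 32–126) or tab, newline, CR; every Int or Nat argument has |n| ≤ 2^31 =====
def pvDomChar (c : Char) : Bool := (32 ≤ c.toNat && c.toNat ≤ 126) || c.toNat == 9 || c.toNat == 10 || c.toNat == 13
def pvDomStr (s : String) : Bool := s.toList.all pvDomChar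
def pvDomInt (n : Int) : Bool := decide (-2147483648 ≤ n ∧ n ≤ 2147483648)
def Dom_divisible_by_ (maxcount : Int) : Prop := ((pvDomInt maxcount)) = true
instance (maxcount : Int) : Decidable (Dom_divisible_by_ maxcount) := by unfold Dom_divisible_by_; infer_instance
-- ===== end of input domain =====

-- B replaces A's single filtering loop with three stepped range enumerations (idiomatic; same O(n) cost).

-- ===== PORT A =====
-- one loop over range(maxcount), three modulo tests appending to three accumulators
def divisible_by_ (maxcount : Int) : List Int × List Int × List Int :=
  (PySem.List.pyRange 0 maxcount 1).foldl
    (fun st i =>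
      let st := if PySem.Int.mod i 2 = 0 then (st.1 ++ [i], st.2.1, st.2.2) else st
      let st := if PySem.Int.mod i 3 = 0 then (st.1, st.2.1 ++ [i], st.2.2) else st
      if PySem.Int.mod i 4 = 0 then (st.1, st.2.1, st.2.2 ++ [i]) else st)
    ([], [], [])

-- ===== PORT B =====
-- three direct stepped enumerations: range(0, maxcount, 2/3/4)
def divisible_by__alt (maxcount : Int) : List Int × List Int × List Int :=
  (PySem.List.pyRange 0 maxcount 2,
   PySem.List.pyRange 0 maxcount 3,
   PySem.List.pyRange 0 maxcount 4)

-- ===== PRECONDITION & SPEC =====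
def Spec_divisible_by_ (maxcount : Int) (out : List Int × List Int × List Int) : Prop := out = divisible_by__alt maxcount
instance (maxcount : Int) (out : List Int × List Int × List Int) : Decidable (Spec_divisible_by_ maxcount out) := by unfold Spec_divisible_by_; infer_instance

-- ===== CLAIM (what is proved, stated in full; the proofs are below) =====
def Claim_equal_divisible_by_ : Prop := ∀ (maxcount : Int), Dom_divisible_by_ maxcount → Spec_divisible_by_ maxcount (divisible_by_ maxcount)

-- ===== LEMMAS AND PROOFS =====

theorem fmod_zero_iff (a s : Int) (h : 0 < s) : PySem.Int.mod a s = 0 ↔ s ∣ a := by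
  unfold PySem.Int.mod
  rw [Int.fmod_eq_emod]
  simp [le_of_lt h]

theorem mod2_iff (a : Int) : (PySem.Int.mod a 2 = 0) = ((2:Int) ∣ a) := propext (fmod_zero_iff a 2 (by norm_num))
theorem mod3_iff (a : Int) : (PySem.Int.mod a 3 = 0) = ((3:Int) ∣ a) := propext (fmod_zero_iff a 3 (by norm_num))
theorem mod4_iff (a : Int) : (PySem.Int.mod a 4 = 0) = ((4:Int) ∣ a) := propext (fmod_zero_iff a 4 (by norm_num))

-- A's loop, started from any state, appends the three filters of the traversed list.
theorem foldl_triple (l : List Int) (t th f : List Int) :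
    l.foldl
      (fun st i =>
        let st := if PySem.Int.mod i 2 = 0 then (st.1 ++ [i], st.2.1, st.2.2) else st
        let st := if PySem.Int.mod i 3 = 0 then (st.1, st.2.1 ++ [i], st.2.2) else st
        if PySem.Int.mod i 4 = 0 then (st.1, st.2.1, st.2.2 ++ [i]) else st)
      (t, th, f)
    = (t ++ l.filter (fun i => PySem.Int.mod i 2 = 0),
       th ++ l.filter (fun i => PySem.Int.mod i 3 = 0),
       f ++ l.filter (fun i => PySem.Int.mod i 4 = 0)) := by
  induction l generalizing t th f with
  | nil => simp
  | cons x xs ih =>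
    simp only [List.foldl_cons, List.filter_cons]
    simp only [mod2_iff, mod3_iff, mod4_iff] at ih ⊢
    by_cases h2 : (2:Int) ∣ x <;> by_cases h3 : (3:Int) ∣ x <;>
      by_cases h4 : (4:Int) ∣ x <;>
      simp [h2, h3, h4, ih]

theorem pairwise_lt_pyRange_pos (n s : Int) (hs : 0 < s) :
    List.Pairwise (· < ·) (PySem.List.pyRange 0 n s) := by
  rw [PySem.List.pyRange_of_pos 0 n hs]
  rw [List.pairwise_map]
  refine List.pairwise_lt_range.imp ?_
  intro a b hab
  have : (a : Int) < (b : Int) := by exact_mod_cast hab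
  nlinarith

-- filtering range(n) by divisibility by s equals the stepped range(0, n, s)
theorem filter_step (n s : Int) (hs : 0 < s) :
    (PySem.List.pyRange 0 n 1).filter (fun i => decide (PySem.Int.mod i s = 0))
      = PySem.List.pyRange 0 n s := by
  have hnd1 : ((PySem.List.pyRange 0 n 1).filter (fun i => decide (PySem.Int.mod i s = 0))).Nodup :=
    (PySem.List.nodup_pyRange_one 0 n).filter _
  have hp2 := pairwise_lt_pyRange_pos n s hs
  have hnd2 : (PySem.List.pyRange 0 n s).Nodup := hp2.imp (fun h => ne_of_lt h)
  have hperm : ((PySem.List.pyRange 0 n 1).filter (fun i => decide (PySem.Int.mod i s = 0))).Perm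
      (PySem.List.pyRange 0 n s) := by
    rw [List.perm_ext_iff_of_nodup hnd1 hnd2]
    intro x
    rw [List.mem_filter, PySem.List.mem_pyRange_one, PySem.List.mem_pyRange_iff_of_pos hs]
    simp [fmod_zero_iff x s hs, and_assoc]
  have hp1 : List.Pairwise (· < ·)
      ((PySem.List.pyRange 0 n 1).filter (fun i => decide (PySem.Int.mod i s = 0))) :=
    (PySem.List.pairwise_lt_pyRange_one 0 n).filter _
  exact List.Perm.eq_of_pairwise (fun a b _ _ hab hba => absurd hba (lt_asymm hab)) hp1 hp2 hperm

-- ===== VERDICT (by name: the statement is the Claim_ definition above) =====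
theorem divisible_by__spec : Claim_equal_divisible_by_ := by
  intro n _
  show divisible_by_ n = divisible_by__alt n
  unfold divisible_by_ divisible_by__alt
  rw [foldl_triple]
  simp only [List.nil_append]
  refine Prod.ext ?_ (Prod.ext ?_ ?_) <;>
    simp only [] <;>
    [exact filter_step n 2 (by norm_num);
     exact filter_step n 3 (by norm_num);
     exact filter_step n 4 (by norm_num)]
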